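-- pv_equiv track=rewrite | github.com/Sprachey/Cipher-Type-Detection | Utils.py | get_x_separate_class
-- ===== SOURCE A (Python) =====
-- def get_x_separate_class(X,Y):
--     X_0,X_1,X_2,X_3 = [],[],[],[]
--     for i in range(len(Y)):
--         if Y[i]==0:   X_0.append(X[i])
--         elif Y[i]==1: X_1.append(X[i])
--         elif Y[i]==2: X_2.append(X[i])
--         elif Y[i]==3: X_3.append(X[i])
--     return X_0,X_1,X_2,X_3
-- ===== SOURCE B (Python) =====
-- def get_x_separate_class(X, Y):
--     pairs = list(zip(X, Y))
--     X_0 = [x for x, y in pairs if y == 0]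
--     X_1 = [x for x, y in pairs if y == 1]
--     X_2 = [x for x, y in pairs if y == 2]
--     X_3 = [x for x, y in pairs if y == 3]
--     return X_0, X_1, X_2, X_3
-- ===== Notes on version B (the rewrite author's own statement) =====
-- stated objective: idiomatic
-- what changed: Replaces A's single indexed loop with stateful four-way if/elif dispatch into mutable accumulators by four independent stateless filter passes (list comprehensions) over the zipped pairs, one per label.
-- outside the precondition, e.g. on get_x_separate_class([], [0]): A raises IndexError, B returns ([], [], [], [])
import Mathlib
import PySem

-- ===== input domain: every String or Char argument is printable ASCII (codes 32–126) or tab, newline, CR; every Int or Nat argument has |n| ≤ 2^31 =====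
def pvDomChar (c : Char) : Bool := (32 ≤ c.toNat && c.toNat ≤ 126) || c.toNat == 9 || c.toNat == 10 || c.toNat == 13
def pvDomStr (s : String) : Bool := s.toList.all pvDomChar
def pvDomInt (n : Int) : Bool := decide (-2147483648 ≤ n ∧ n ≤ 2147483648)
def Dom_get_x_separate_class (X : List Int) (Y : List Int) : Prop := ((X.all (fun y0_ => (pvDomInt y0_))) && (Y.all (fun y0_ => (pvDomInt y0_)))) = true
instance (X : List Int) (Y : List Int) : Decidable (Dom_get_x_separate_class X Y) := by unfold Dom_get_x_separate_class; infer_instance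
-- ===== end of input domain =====

-- B replaces A's single stateful loop with four-way if/elif dispatch into mutable
-- accumulators by four independent stateless filter passes over the zipped pairs (idiomatic).

-- ===== PORT A =====
-- the body of A's for-loop at index i, acting on the state (X_0,X_1,X_2,X_3)
def pvStepA (X : List Int) (Y : List Int)
    (s : List Int × List Int × List Int × List Int) (i : Int) :
    List Int × List Int × List Int × List Int :=
  match PySem.List.pyGet? Y i with
  | none => s
  | some y =>
    if y == 0 then
      match PySem.List.pyGet? X i with
      | some x => (s.1 ++ [x], s.2.1, s.2.2.1, s.2.2.2)
      | none => s
    else if y == 1 then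
      match PySem.List.pyGet? X i with
      | some x => (s.1, s.2.1 ++ [x], s.2.2.1, s.2.2.2)
      | none => s
    else if y == 2 then
      match PySem.List.pyGet? X i with
      | some x => (s.1, s.2.1, s.2.2.1 ++ [x], s.2.2.2)
      | none => s
    else if y == 3 then
      match PySem.List.pyGet? X i with
      | some x => (s.1, s.2.1, s.2.2.1, s.2.2.2 ++ [x])
      | none => s
    else s

def get_x_separate_class (X : List Int) (Y : List Int) :
    List Int × List Int × List Int × List Int :=
  (PySem.List.pyRange 0 (Y.length : Int) 1).foldl (pvStepA X Y) ([], [], [], [])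

-- ===== PORT B =====
def get_x_separate_class_alt (X : List Int) (Y : List Int) :
    List Int × List Int × List Int × List Int :=
  let pairs := X.zip Y
  (((pairs.filter (fun p => p.2 == 0)).map (·.1)),
   ((pairs.filter (fun p => p.2 == 1)).map (·.1)),
   ((pairs.filter (fun p => p.2 == 2)).map (·.1)),
   ((pairs.filter (fun p => p.2 == 3)).map (·.1)))

-- ===== PRECONDITION & SPEC =====
-- Pre_ excludes exactly the inputs where A raises IndexError: some index i ≥ len(X)
-- (but i < len(Y)) whose label Y[i] is one of 0,1,2,3 makes A evaluate X[i] out of range.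
def Pre_get_x_separate_class (X : List Int) (Y : List Int) : Prop :=
  ∀ y ∈ Y.drop X.length, y ≠ 0 ∧ y ≠ 1 ∧ y ≠ 2 ∧ y ≠ 3
instance (X : List Int) (Y : List Int) : Decidable (Pre_get_x_separate_class X Y) := by
  unfold Pre_get_x_separate_class; infer_instance
def pvWitness_get_x_separate_class : List Int × List Int := ([10, 20, 30], [1, 3, 0])

def Spec_get_x_separate_class (X : List Int) (Y : List Int)
    (out : List Int × List Int × List Int × List Int) : Prop :=
  out = get_x_separate_class_alt X Y
instance (X : List Int) (Y : List Int) (out : List Int × List Int × List Int × List Int) :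
    Decidable (Spec_get_x_separate_class X Y out) := by
  unfold Spec_get_x_separate_class; infer_instance

-- ===== CLAIM (what is proved, stated in full; the proofs are below) =====
def Claim_equal_get_x_separate_class : Prop :=
  ∀ (X : List Int) (Y : List Int), Dom_get_x_separate_class X Y →
    Pre_get_x_separate_class X Y →
    Spec_get_x_separate_class X Y (get_x_separate_class X Y)

-- ===== LEMMAS AND PROOFS =====

-- shifting a cons past pyGet?
theorem pvGet_cons_shift {α : Type} (z : α) (Z : List α) (i : Int) (h : 0 ≤ i) :
    PySem.List.pyGet? (z :: Z) (i + 1) = PySem.List.pyGet? Z i := by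
  obtain ⟨n, rfl⟩ := Int.eq_ofNat_of_zero_le h
  exact PySem.List.pyGet?_cons_succ z Z n

-- fold over range 1..n+1 is fold over range 0..n with the index shifted
theorem pvFoldl_range_shift {S : Type} (f : S → Int → S) (n : Int) (s : S) :
    (PySem.List.pyRange 1 (n + 1) 1).foldl f s =
      (PySem.List.pyRange 0 n 1).foldl (fun s i => f s (i + 1)) s := by
  rw [PySem.List.pyRange_one, PySem.List.pyRange_one]
  simp only [add_sub_cancel_right, Int.sub_zero, List.foldl_map]
  exact PySem.List.foldl_congr_mem _ _ _ _ (by intro acc k _; congr 1; ring)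

-- the per-index step on cons lists shifted by one is the step on the tails
theorem pvStepA_shift (x y : Int) (X Y : List Int) (s : List Int × List Int × List Int × List Int)
    (i : Int) (h : 0 ≤ i) :
    pvStepA (x :: X) (y :: Y) s (i + 1) = pvStepA X Y s i := by
  unfold pvStepA
  rw [pvGet_cons_shift y Y i h, pvGet_cons_shift x X i h]

theorem pvStepA_shift_nil (y : Int) (Y : List Int) (s : List Int × List Int × List Int × List Int)
    (i : Int) (h : 0 ≤ i) :
    pvStepA [] (y :: Y) s (i + 1) = pvStepA [] Y s i := by
  unfold pvStepA
  rw [pvGet_cons_shift y Y i h]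
  have hnil : ∀ j : Int, 0 ≤ j → PySem.List.pyGet? ([] : List Int) j = none := by
    intro j hj
    obtain ⟨n, rfl⟩ := Int.eq_ofNat_of_zero_le hj
    simp
  rw [hnil (i + 1) (by omega), hnil i h]

-- bucket k of the zipped pairs (B's comprehension for label k)
def pvBucket (k : Int) (X : List Int) (Y : List Int) : List Int :=
  ((X.zip Y).filter (fun p => p.2 == k)).map (·.1)

theorem pvMain (Y : List Int) : ∀ (X : List Int) (a b c d : List Int),
    Pre_get_x_separate_class X Y →
    (PySem.List.pyRange 0 (Y.length : Int) 1).foldl (pvStepA X Y) (a, b, c, d) =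
      (a ++ pvBucket 0 X Y, b ++ pvBucket 1 X Y, c ++ pvBucket 2 X Y, d ++ pvBucket 3 X Y) := by
  induction Y with
  | nil =>
    intro X a b c d _
    simp [PySem.List.pyRange_one_eq_nil, pvBucket]
  | cons y Y ih =>
    intro X a b c d hpre
    have hlen : (0:Int) < ((y :: Y).length : Int) := by simp
    rw [PySem.List.pyRange_one_cons hlen]
    simp only [List.foldl_cons, List.length_cons, zero_add]
    have hcast : (((Y.length + 1 : Nat)) : Int) = ((Y.length : Int) + 1) := by push_cast; ring
    rw [hcast, pvFoldl_range_shift]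
    cases X with
    | nil =>
      have hy := hpre y (by simp)
      obtain ⟨h0, h1, h2, h3⟩ := hy
      have hstep0 : pvStepA [] (y :: Y) (a, b, c, d) 0 = (a, b, c, d) := by
        unfold pvStepA
        rw [PySem.List.pyGet?_zero_cons]
        have hn : PySem.List.pyGet? ([] : List Int) 0 = none := by decide
        simp [hn]
      rw [hstep0]
      have hcong : (PySem.List.pyRange 0 (Y.length : Int) 1).foldl
          (fun s i => pvStepA [] (y :: Y) s (i + 1)) (a, b, c, d) =
          (PySem.List.pyRange 0 (Y.length : Int) 1).foldl (pvStepA [] Y) (a, b, c, d) :=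
        PySem.List.foldl_congr_mem _ _ _ _ (by
          intro s i hi
          exact pvStepA_shift_nil y Y s i ((PySem.List.mem_pyRange_one.mp hi).1))
      rw [hcong, ih [] a b c d (by intro z hz; exact hpre z (by simp at hz ⊢; exact Or.inr hz))]
      simp [pvBucket]
    | cons x X =>
      have hpre' : Pre_get_x_separate_class X Y := by
        intro z hz; exact hpre z (by simpa using hz)
      have hcong : (PySem.List.pyRange 0 (Y.length : Int) 1).foldl
          (fun s i => pvStepA (x :: X) (y :: Y) s (i + 1))
            (pvStepA (x :: X) (y :: Y) (a, b, c, d) 0) =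
          (PySem.List.pyRange 0 (Y.length : Int) 1).foldl (pvStepA X Y)
            (pvStepA (x :: X) (y :: Y) (a, b, c, d) 0) :=
        PySem.List.foldl_congr_mem _ _ _ _ (by
          intro s i hi
          exact pvStepA_shift x y X Y s i ((PySem.List.mem_pyRange_one.mp hi).1))
      rw [hcong]
      have hstep0 : pvStepA (x :: X) (y :: Y) (a, b, c, d) 0 =
          (if y == 0 then (a ++ [x], b, c, d)
           else if y == 1 then (a, b ++ [x], c, d)
           else if y == 2 then (a, b, c ++ [x], d)
           else if y == 3 then (a, b, c, d ++ [x])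
           else (a, b, c, d)) := by
        unfold pvStepA
        rw [PySem.List.pyGet?_zero_cons, PySem.List.pyGet?_zero_cons]
      rw [hstep0]
      by_cases h0 : y = 0
      · subst h0
        simp only [beq_self_eq_true, if_true]
        rw [ih X (a ++ [x]) b c d hpre']
        simp [pvBucket]
      · by_cases h1 : y = 1
        · subst h1
          simp only [show ((1 : Int) == 0) = false by decide, beq_self_eq_true, if_true,
            Bool.false_eq_true, if_false]
          rw [ih X a (b ++ [x]) c d hpre']
          simp [pvBucket]
        · by_cases h2 : y = 2
          · subst h2
            simp only [show ((2 : Int) == 0) = false by decide,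
              show ((2 : Int) == 1) = false by decide, beq_self_eq_true, if_true,
              Bool.false_eq_true, if_false]
            rw [ih X a b (c ++ [x]) d hpre']
            simp [pvBucket]
          · by_cases h3 : y = 3
            · subst h3
              simp only [show ((3 : Int) == 0) = false by decide,
                show ((3 : Int) == 1) = false by decide,
                show ((3 : Int) == 2) = false by decide, beq_self_eq_true, if_true,
                Bool.false_eq_true, if_false]
              rw [ih X a b c (d ++ [x]) hpre']
              simp [pvBucket]
            · have e0 : (y == 0) = false := by simp [h0]
              have e1 : (y == 1) = false := by simp [h1]
              have e2 : (y == 2) = false := by simp [h2]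
              have e3 : (y == 3) = false := by simp [h3]
              simp only [e0, e1, e2, e3, Bool.false_eq_true, if_false]
              rw [ih X a b c d hpre']
              simp [pvBucket, e0, e1, e2, e3]

theorem pvAlt_eq (X Y : List Int) :
    get_x_separate_class_alt X Y =
      (pvBucket 0 X Y, pvBucket 1 X Y, pvBucket 2 X Y, pvBucket 3 X Y) := rfl

-- ===== VERDICT (by name: the statement is the Claim_ definition above) =====
theorem get_x_separate_class_spec : Claim_equal_get_x_separate_class := by
  intro X Y _ hpre
  unfold Spec_get_x_separate_class get_x_separate_class
  rw [pvMain Y X [] [] [] [] hpre, pvAlt_eq]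
  simp
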